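-- pv_equiv track=rewrite | github.com/ariuk44/retake_exam_prep | day_17.py | isFilter
-- ===== SOURCE A (Python) =====
-- def isFilter(arr):
--     has_9 = 0
--     has_11 = 0
--     has_7 = 0
--     has_13 = 0
--     for i in arr:
--         if i == 9:
--             has_9 = 1
--         if i == 11:
--             has_11 = 1
--         if i == 7:
--             has_7 = 1
--         if i == 13:
--             has_13 = 1
--     if has_9 == 1 and has_11 == 0:
--         return 0
--     if has_7 == 1 and has_13 == 1:
--         return 0
--     return 1
-- ===== SOURCE B (Python) =====
-- # Table-driven: encode which of 7/9/11/13 occur as a 4-bit mask, look the answer up.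
-- _TABLE = (1, 1, 0, 0, 1, 1, 1, 1, 1, 0, 0, 0, 1, 0, 1, 0)
--
-- def isFilter(arr):
--     mask = sum(bit for bit, v in ((1, 7), (2, 9), (4, 11), (8, 13)) if v in arr)
--     return _TABLE[mask]
-- ===== Notes on version B (the rewrite author's own statement) =====
-- stated objective: alternative
-- what changed: Replaces the flag-accumulating loop and the two-branch decision chain by a bitmask of the four memberships and a precomputed 16-entry truth table lookup (branch logic eliminated).
import Mathlib
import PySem

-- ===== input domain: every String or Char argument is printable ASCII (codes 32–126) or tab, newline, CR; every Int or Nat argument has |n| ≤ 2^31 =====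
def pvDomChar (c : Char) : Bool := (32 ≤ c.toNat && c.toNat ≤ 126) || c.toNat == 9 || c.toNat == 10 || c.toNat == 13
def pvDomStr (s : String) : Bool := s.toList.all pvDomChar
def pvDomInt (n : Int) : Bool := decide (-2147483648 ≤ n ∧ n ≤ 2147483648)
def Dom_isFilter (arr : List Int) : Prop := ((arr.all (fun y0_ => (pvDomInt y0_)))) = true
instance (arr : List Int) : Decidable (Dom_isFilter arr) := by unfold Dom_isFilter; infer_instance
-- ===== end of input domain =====

-- B replaces A's flag-accumulating loop and branch chain by a 4-bit membership mask and a precomputed 16-entry truth-table lookup (alternative formulation, same cost).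

-- ===== PORT A =====
-- literal port of A's loop: state (has_9, has_11, has_7, has_13) as ints, set to 1 on match
def isFilter (arr : List Int) : Int :=
  let s := arr.foldl
    (fun (st : Int × Int × Int × Int) i =>
      let st := if i == 9 then (1, st.2.1, st.2.2.1, st.2.2.2) else st
      let st := if i == 11 then (st.1, 1, st.2.2.1, st.2.2.2) else st
      let st := if i == 7 then (st.1, st.2.1, 1, st.2.2.2) else st
      let st := if i == 13 then (st.1, st.2.1, st.2.2.1, 1) else st
      st)
    (0, 0, 0, 0)
  if s.1 == 1 && s.2.1 == 0 then 0
  else if s.2.2.1 == 1 && s.2.2.2 == 1 then 0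
  else 1

-- ===== PORT B =====
def pvTable : List Int := [1, 1, 0, 0, 1, 1, 1, 1, 1, 0, 0, 0, 1, 0, 1, 0]

def isFilter_alt (arr : List Int) : Int :=
  -- sum(bit for bit, v in ((1,7),(2,9),(4,11),(8,13)) if v in arr)
  let mask := ([((1:Int),(7:Int)), (2,9), (4,11), (8,13)]).foldl
    (fun (acc : Int) p => if arr.contains p.2 then acc + p.1 else acc) 0
  -- _TABLE[mask]: mask is always in [0,15], so the index is in range (pyGet? returns some)
  (PySem.List.pyGet? pvTable mask).getD 0

-- ===== PRECONDITION & SPEC =====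
def Spec_isFilter (arr : List Int) (out : Int) : Prop := out = isFilter_alt arr
instance (arr : List Int) (out : Int) : Decidable (Spec_isFilter arr out) := by unfold Spec_isFilter; infer_instance

-- ===== CLAIM (what is proved, stated in full; the proofs are below) =====
def Claim_equal_isFilter : Prop := ∀ (arr : List Int), Dom_isFilter arr → Spec_isFilter arr (isFilter arr)

-- ===== LEMMAS AND PROOFS =====
-- A's loop final state: each flag is 1 iff the value occurs, starting from any state
lemma isFilter_fold_char (arr : List Int) (a b c d : Int) :
    arr.foldl
      (fun (st : Int × Int × Int × Int) i =>
        let st := if i == 9 then (1, st.2.1, st.2.2.1, st.2.2.2) else st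
        let st := if i == 11 then (st.1, 1, st.2.2.1, st.2.2.2) else st
        let st := if i == 7 then (st.1, st.2.1, 1, st.2.2.2) else st
        let st := if i == 13 then (st.1, st.2.1, st.2.2.1, 1) else st
        st)
      (a, b, c, d)
    = ((if arr.contains 9 then 1 else a),
       (if arr.contains 11 then 1 else b),
       (if arr.contains 7 then 1 else c),
       (if arr.contains 13 then 1 else d)) := by
  induction arr generalizing a b c d with
  | nil => simp
  | cons x xs ih =>
    simp only [List.foldl_cons, List.contains_cons]
    rw [ih]
    by_cases h9 : x == 9 <;> by_cases h11 : x == 11 <;> by_cases h7 : x == 7 <;>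
      by_cases h13 : x == 13 <;> simp_all <;>
      refine ⟨?_, ?_, ?_, ?_⟩ <;> split_ifs <;> first | rfl | omega | tauto

-- ===== VERDICT (by name: the statement is the Claim_ definition above) =====
theorem isFilter_spec : Claim_equal_isFilter := by
  intro arr _
  unfold Spec_isFilter isFilter isFilter_alt
  rw [isFilter_fold_char]
  simp only [List.foldl_cons, List.foldl_nil]
  by_cases h9 : arr.contains 9 <;> by_cases h11 : arr.contains 11 <;>
    by_cases h7 : arr.contains 7 <;> by_cases h13 : arr.contains 13 <;>
    simp_all <;> decide
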